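-- pv_equiv track=rewrite | github.com/dejbug/springer-turniere | turniere.py | grandPrixScoreFromPlacing
-- ===== SOURCE A (Python) =====
-- def grandPrixScoreFromPlacing(placing):
-- 	xx = {}
-- 	x = 10
-- 	if len(placing) == 0: return {}
-- 	if len(placing) == 1: return { placing.keys()[0] : x }
-- 	placing = sorted(placing.items(), key = lambda p: p[1])
-- 	if placing[0][1] == placing[1][1]:
-- 		x = 9
-- 	oldplace = None
-- 	for pid, place in placing:
-- 		if oldplace is not None and place != oldplace:
-- 			x = 10 - place
-- 		xx[pid] = x
-- 		oldplace = place
-- 	return xx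
-- 	x = 10
-- 	if len(placing) == 0: pass
-- 	elif len(placing) == 1:
-- 		xx[placing[0][0]] = x
-- 	else:
-- 		if placing[0][1] == placing[1][1]:
-- 			x = 9
-- 		for i in range(len(placing)):
-- 			if i > 0 and placing[i][1] != placing[i - 1][1] and x > 0:
-- 				x -= 1
-- 			xx[placing[i][0]] = x
-- 	return xx
-- ===== SOURCE B (Python) =====
-- def grandPrixScoreFromPlacing(placing):
--     # Closed-form scoring: no stateful running-score loop; each place scores
--     # top (10, or 9 on a tie at the top) if it is the minimum place, else 10 - place.
--     if len(placing) == 0: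
--         return {}
--     if len(placing) == 1:
--         ((k, _),) = placing.items()
--         return {k: 10}
--     vals = list(placing.values())
--     minp = min(vals)
--     top = 9 if vals.count(minp) >= 2 else 10
--     return {k: (top if p == minp else 10 - p)
--             for k, p in sorted(placing.items(), key=lambda kv: kv[1])}
-- ===== Notes on version B (the rewrite author's own statement) =====
-- stated objective: simpler
-- what changed: Replaces A's stateful loop (running score x and oldplace carried across the sorted items, plus a large block of dead code after the first return) with a closed-form per-entry score: compute the minimum place and a tie flag once, then build the dict in one comprehension over the sorted items.
-- crash fix: On length-1 dicts A raises TypeError under Python 3 (placing.keys()[0] subscripts a dict_keys view); B returns the dict mapping the single key to 10. — e.g. on grandPrixScoreFromPlacing([(5, 3)]): A raises TypeError, B returns [(5, 10)]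
import Mathlib
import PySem

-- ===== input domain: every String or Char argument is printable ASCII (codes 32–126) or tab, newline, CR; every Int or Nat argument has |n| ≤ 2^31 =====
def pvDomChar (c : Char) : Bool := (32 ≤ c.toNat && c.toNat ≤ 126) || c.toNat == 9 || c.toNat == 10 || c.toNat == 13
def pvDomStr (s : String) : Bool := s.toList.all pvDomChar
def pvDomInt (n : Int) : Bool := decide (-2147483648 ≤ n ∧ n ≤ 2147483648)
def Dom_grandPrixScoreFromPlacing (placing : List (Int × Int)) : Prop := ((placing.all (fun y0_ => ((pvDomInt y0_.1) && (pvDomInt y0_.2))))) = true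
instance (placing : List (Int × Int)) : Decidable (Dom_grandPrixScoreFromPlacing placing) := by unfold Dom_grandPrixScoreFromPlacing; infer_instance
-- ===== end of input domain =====

-- B replaces A's stateful running-score loop over the sorted items with a closed-form
-- per-entry score (minimum place + tie flag computed once, then one comprehension); same cost, simpler.


-- ===== PORT A =====
-- the loop body: state (xx, x, oldplace); 'if oldplace is not None and place != oldplace: x = 10 - place'
def gpStepA (st : PySem.Dict Int Int × Int × Option Int) (kp : Int × Int) :
    PySem.Dict Int Int × Int × Option Int :=
  let x : Int :=
    match st.2.2 with
    | some old => if kp.2 ≠ old then 10 - kp.2 else st.2.1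
    | none => st.2.1
  (st.1.insert kp.1 x, x, some kp.2)

def grandPrixScoreFromPlacing (placing : List (Int × Int)) : List (Int × Int) :=
  if placing.length = 0 then []
  else if placing.length = 1 then
    -- Python 3 raises TypeError here ('dict_keys' object is not subscriptable); excluded by Pre_
    [((placing.headD (0, 0)).1, 10)]
  else
    let s := PySem.List.sorted placing (fun p => p.2) false
    match s with
    | (_, p0) :: (_, p1) :: _ =>
      let x : Int := if p0 = p1 then 9 else 10
      (s.foldl gpStepA (PySem.Dict.empty, x, none)).1.items
    | _ => []  -- unreachable: s.length = placing.length ≥ 2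

-- ===== PORT B =====
def grandPrixScoreFromPlacing_alt (placing : List (Int × Int)) : List (Int × Int) :=
  match placing with
  | [] => []
  | [(k, _)] => [(k, 10)]
  | _ =>
    let vals := placing.map Prod.snd
    let minp := (PySem.List.min? vals (fun y => y)).getD 0  -- vals ≠ [] here, so min? is some: exact
    let top : Int := if 2 ≤ vals.count minp then 9 else 10
    -- dict comprehension over distinct keys (Pre_) appends in iteration order
    (PySem.List.sorted placing (fun p => p.2) false).map
      (fun kp => (kp.1, if kp.2 = minp then top else 10 - kp.2))

-- ===== PRECONDITION & SPEC =====
-- Pre_ excludes length-1 inputs (A raises TypeError under Python 3: placing.keys()[0] subscripts a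
-- dict_keys view) and association lists with duplicate keys (a Python dict cannot contain them).
def Pre_grandPrixScoreFromPlacing (placing : List (Int × Int)) : Prop :=
  (placing.map Prod.fst).Nodup ∧ placing.length ≠ 1
instance (placing : List (Int × Int)) : Decidable (Pre_grandPrixScoreFromPlacing placing) := by
  unfold Pre_grandPrixScoreFromPlacing; infer_instance

def pvWitness_grandPrixScoreFromPlacing : (List (Int × Int)) := [(1, 2), (2, 2), (3, 5)]

-- On length-1 dicts A raises TypeError (dict_keys view subscripted under Python 3); B returns the
-- dict mapping the single key to 10: see theorem grandPrixScoreFromPlacing_raises at the bottom.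
def Raises_grandPrixScoreFromPlacing (placing : List (Int × Int)) : Prop := placing.length = 1
instance (placing : List (Int × Int)) : Decidable (Raises_grandPrixScoreFromPlacing placing) := by
  unfold Raises_grandPrixScoreFromPlacing; infer_instance
def pvRaiseWitness_grandPrixScoreFromPlacing : (List (Int × Int)) := [(5, 3)]
def pvRaiseWitnessOut_grandPrixScoreFromPlacing : List (Int × Int) := [(5, 10)]

def Spec_grandPrixScoreFromPlacing (placing : List (Int × Int)) (out : List (Int × Int)) : Prop :=
  out = grandPrixScoreFromPlacing_alt placing
instance (placing : List (Int × Int)) (out : List (Int × Int)) :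
    Decidable (Spec_grandPrixScoreFromPlacing placing out) := by
  unfold Spec_grandPrixScoreFromPlacing; infer_instance

-- ===== CLAIM (what is proved, stated in full; the proofs are below) =====
def Claim_equal_grandPrixScoreFromPlacing : Prop :=
  ∀ (placing : List (Int × Int)), Dom_grandPrixScoreFromPlacing placing →
    Pre_grandPrixScoreFromPlacing placing →
    Spec_grandPrixScoreFromPlacing placing (grandPrixScoreFromPlacing placing)

def Claim_raises_grandPrixScoreFromPlacing : Prop :=
  (∀ (placing : List (Int × Int)), Dom_grandPrixScoreFromPlacing placing →
    Raises_grandPrixScoreFromPlacing placing → ¬ Pre_grandPrixScoreFromPlacing placing) ∧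
  (Dom_grandPrixScoreFromPlacing (pvRaiseWitness_grandPrixScoreFromPlacing) ∧
   Raises_grandPrixScoreFromPlacing (pvRaiseWitness_grandPrixScoreFromPlacing) ∧
   grandPrixScoreFromPlacing_alt (pvRaiseWitness_grandPrixScoreFromPlacing) =
     pvRaiseWitnessOut_grandPrixScoreFromPlacing)

-- ===== LEMMAS AND PROOFS =====

-- A's loop over a block of sorted items, with the score already closed-form:
-- if every pending place is ≥ old, p0 ≤ old, keys are fresh and distinct, then the fold appends
-- (k, score p) for each item, where score p = if p = p0 then top else 10 - p.
lemma gp_loop_items (p0 top : Int) :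
    ∀ (t : List (Int × Int)) (d : PySem.Dict Int Int) (old : Int),
      t.Pairwise (fun a b => a.2 ≤ b.2) →
      (∀ q ∈ t, old ≤ q.2) → p0 ≤ old →
      (∀ q ∈ t, d.contains q.1 = false) → (t.map Prod.fst).Nodup →
      (t.foldl gpStepA (d, (if old = p0 then top else 10 - old), some old)).1.items =
        d.items ++ t.map (fun kp => (kp.1, if kp.2 = p0 then top else 10 - kp.2)) := by
  intro t
  induction t with
  | nil => intro d old _ _ _ _ _; simp
  | cons kp t' ih =>
    intro d old hpw hge hp0 hfresh hnd
    obtain ⟨k, p⟩ := kp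
    have hop : old ≤ p := hge (k, p) (by simp)
    have hx : (gpStepA (d, (if old = p0 then top else 10 - old), some old) (k, p)) =
        (d.insert k (if p = p0 then top else 10 - p),
         (if p = p0 then top else 10 - p), some p) := by
      simp only [gpStepA]
      by_cases hpe : p = old
      · subst hpe; simp
      · have hlt : old < p := lt_of_le_of_ne hop (fun h => hpe h.symm)
        have hne : ¬ p = p0 := by omega
        simp [hpe, hne]
    rw [List.foldl_cons, hx]
    have hfr : d.contains k = false := hfresh (k, p) (by simp)
    have hnd' : k ∉ (t'.map Prod.fst) ∧ (t'.map Prod.fst).Nodup := by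
      rw [List.map_cons, List.nodup_cons] at hnd; exact hnd
    have hrec := ih (d.insert k (if p = p0 then top else 10 - p)) p
      (List.pairwise_cons.1 hpw).2
      (fun q hq => (List.pairwise_cons.1 hpw).1 q hq)
      (le_trans hp0 hop)
      (fun q hq => by
        rw [PySem.Dict.contains_insert]
        have hk : q.1 ≠ k := by
          intro h; exact hnd'.1 (h ▸ (List.mem_map_of_mem hq))
        simp [hk, hfresh q (List.mem_cons_of_mem _ hq)])
      hnd'.2
    rw [hrec, PySem.Dict.items_insert_of_not_contains _ _ hfr]
    simp

-- min over any permutation of the sorted list is its head's place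
lemma gp_min_eq (placing : List (Int × Int)) (k0 : Int) (p0 : Int) (rest : List (Int × Int))
    (hs : PySem.List.sorted placing (fun p => p.2) false = (k0, p0) :: rest) :
    (PySem.List.min? (placing.map Prod.snd) (fun y => y)).getD 0 = p0 := by
  have hperm := PySem.List.sorted_perm placing (fun p => p.2) false
  have hhead : ∀ y ∈ placing, p0 ≤ y.2 := by
    intro y hy; exact PySem.List.key_head_sorted_le placing (fun p => p.2) hs y hy
  have hmem : (k0, p0) ∈ placing := (hperm.mem_iff).1 (hs ▸ List.mem_cons_self ..)
  have hpv : p0 ∈ placing.map Prod.snd := List.mem_map_of_mem hmem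
  cases hm : PySem.List.min? (placing.map Prod.snd) (fun y => y) with
  | none =>
    rw [PySem.List.min?_eq_none_iff] at hm
    rw [hm] at hpv; simp at hpv
  | some m =>
    obtain ⟨q, hq, hqe⟩ := List.mem_map.1 (PySem.List.min?_mem hm)
    have h1 : p0 ≤ m := hqe ▸ hhead q hq
    have h2 : m ≤ p0 := PySem.List.min?_isMin hm p0 hpv
    simp; omega

-- the tie flag: p0 occurs twice in the values iff the second sorted place equals the first
lemma gp_count_iff (placing : List (Int × Int)) (k0 k1 p0 p1 : Int) (rest : List (Int × Int))
    (hs : PySem.List.sorted placing (fun p => p.2) false = (k0, p0) :: (k1, p1) :: rest) :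
    (2 ≤ (placing.map Prod.snd).count p0) ↔ p1 = p0 := by
  have hperm := PySem.List.sorted_perm placing (fun p => p.2) false
  have hc : (placing.map Prod.snd).count p0 =
      ((PySem.List.sorted placing (fun p => p.2) false).map Prod.snd).count p0 :=
    ((hperm.map Prod.snd).count_eq p0).symm
  have hpw := PySem.List.sorted_pairwise placing (fun p => p.2)
  rw [hs] at hpw
  rw [hc, hs]
  by_cases h : p1 = p0
  · subst h
    simp
  · have h01 : p0 ≤ p1 := (List.pairwise_cons.1 hpw).1 (k1, p1) (by simp)
    have hrest : ∀ r ∈ rest, p1 ≤ r.2 :=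
      fun r hr => (List.pairwise_cons.1 (List.pairwise_cons.1 hpw).2).1 r hr
    have hz : (rest.map Prod.snd).count p0 = 0 := by
      rw [List.count_eq_zero]
      intro hmem
      obtain ⟨r, hr, hre⟩ := List.mem_map.1 hmem
      have := hrest r hr
      have hlt : p0 < p1 := lt_of_le_of_ne h01 (fun he => h he.symm)
      omega
    simp [hz, h]

-- ===== VERDICT (by name: the statement is the Claim_ definition above) =====
theorem grandPrixScoreFromPlacing_raises : Claim_raises_grandPrixScoreFromPlacing := by
  unfold Claim_raises_grandPrixScoreFromPlacing
  refine ⟨?_, by decide⟩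
  intro placing _ hr hpre
  exact hpre.2 hr

theorem grandPrixScoreFromPlacing_spec : Claim_equal_grandPrixScoreFromPlacing := by
  intro placing hdom hpre
  unfold Spec_grandPrixScoreFromPlacing
  match hpl : placing with
  | [] => rfl
  | [(k, p)] =>
    -- excluded: this is exactly the crash region of A (Claim_raises)
    have hdis := grandPrixScoreFromPlacing_raises
    unfold Claim_raises_grandPrixScoreFromPlacing at hdis
    exact absurd hpre (hdis.1 [(k, p)] (hpl ▸ hdom) rfl)
  | (a1, a2) :: (b1, b2) :: tl =>
    have hlen : ¬ ((a1, a2) :: (b1, b2) :: tl).length = 0 ∧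
        ¬ ((a1, a2) :: (b1, b2) :: tl).length = 1 := by simp
    set pl := (a1, a2) :: (b1, b2) :: tl with hpldef
    -- name the sorted list and split off its first two entries
    have hslen : (PySem.List.sorted pl (fun p => p.2) false).length = pl.length :=
      PySem.List.length_sorted ..
    obtain ⟨k0, p0, k1, p1, rest, hs⟩ :
        ∃ k0 p0 k1 p1 rest, PySem.List.sorted pl (fun p => p.2) false =
          (k0, p0) :: (k1, p1) :: rest := by
      cases hq : PySem.List.sorted pl (fun p => p.2) false with
      | nil => rw [hq] at hslen; simp [hpldef] at hslen
      | cons x ys =>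
        cases ys with
        | nil => rw [hq] at hslen; simp [hpldef] at hslen
        | cons y zs =>
          obtain ⟨xa, xb⟩ := x
          obtain ⟨ya, yb⟩ := y
          exact ⟨xa, xb, ya, yb, zs, rfl⟩
    have hperm := PySem.List.sorted_perm pl (fun p => p.2) false
    have hpw := PySem.List.sorted_pairwise pl (fun p => p.2)
    rw [hs] at hpw
    have hnds : ((PySem.List.sorted pl (fun p => p.2) false).map Prod.fst).Nodup :=
      (hperm.map Prod.fst).nodup_iff.2 hpre.1
    rw [hs] at hnds
    have hnd0 : k0 ∉ (((k1, p1) :: rest).map Prod.fst) ∧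
        (((k1, p1) :: rest).map Prod.fst).Nodup := by
      rw [List.map_cons, List.nodup_cons] at hnds; exact hnds
    -- the common score parameters
    have htop : (if p0 = p1 then (9 : Int) else 10) = (if p1 = p0 then 9 else 10) := by
      by_cases h : p0 = p1 <;> simp [h, eq_comm]
    -- A's side
    have hA : grandPrixScoreFromPlacing pl =
        ((k0, p0) :: (k1, p1) :: rest).map
          (fun kp => (kp.1, if kp.2 = p0 then (if p1 = p0 then (9 : Int) else 10)
                            else 10 - kp.2)) := by
      unfold grandPrixScoreFromPlacing
      rw [if_neg (by simp [hpldef]), if_neg (by simp [hpldef])]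
      simp only [hs]
      rw [List.foldl_cons]
      have hstep : gpStepA (PySem.Dict.empty, if p0 = p1 then (9 : Int) else 10, none) (k0, p0) =
          (PySem.Dict.empty.insert k0 (if p1 = p0 then (9 : Int) else 10),
           (if p0 = p0 then (if p1 = p0 then (9 : Int) else 10) else 10 - p0), some p0) := by
        simp [gpStepA, htop]
      rw [hstep]
      rw [gp_loop_items p0 (if p1 = p0 then (9 : Int) else 10) ((k1, p1) :: rest)
            (PySem.Dict.empty.insert k0 (if p1 = p0 then (9 : Int) else 10)) p0
            (List.pairwise_cons.1 hpw).2
            (fun q hq => (List.pairwise_cons.1 hpw).1 q hq)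
            le_rfl
            (fun q hq => by
              rw [PySem.Dict.contains_insert]
              have hk : q.1 ≠ k0 := fun h => hnd0.1 (h ▸ List.mem_map_of_mem hq)
              simp [hk])
            hnd0.2]
      rw [PySem.Dict.items_insert_of_not_contains _ _ (by simp)]
      simp
      rfl
    -- B's side
    have hB : grandPrixScoreFromPlacing_alt pl =
        ((k0, p0) :: (k1, p1) :: rest).map
          (fun kp => (kp.1, if kp.2 = p0 then (if p1 = p0 then (9 : Int) else 10)
                            else 10 - kp.2)) := by
      have hcnt := gp_count_iff pl k0 k1 p0 p1 rest hs
      have htop' : (if 2 ≤ (pl.map Prod.snd).count p0 then (9 : Int) else 10) =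
          (if p1 = p0 then 9 else 10) := by
        by_cases ht : p1 = p0
        · rw [if_pos (hcnt.2 ht), if_pos ht]
        · rw [if_neg (fun hc => ht (hcnt.1 hc)), if_neg ht]
      unfold grandPrixScoreFromPlacing_alt
      simp only [hpldef]
      rw [← hpldef, gp_min_eq pl k0 p0 ((k1, p1) :: rest) hs, htop', hs]
    rw [hA, hB]
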